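-- pv_equiv track=rewrite | github.com/olsenw/LeetCodeExercises | Python3/maximum_number_of_points_with_cost.py | maxPoints_tle2
-- ===== SOURCE A (Python) =====
-- from functools import cache
-- from typing import List, Dict, Set, Optional
--
-- def maxPoints_tle2(points: List[List[int]]) -> int:
--     m,n = len(points), len(points[0])
--     @cache
--     def dp(i,j):
--         if i == 0:
--             return points[0][j]
--         return max(points[i][j] + dp(i-1, k) - abs(j-k) for k in range(n))
--     return max(dp(m-1,k) for k in range(n))
-- ===== SOURCE B (Python) =====
-- from typing import List
--
-- def maxPoints_tle2(points: List[List[int]]) -> int: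
--     n = len(points[0])
--     prev = points[0][:n]
--     for row in points[1:]:
--         best = prev[0]
--         left = [best]
--         for j in range(1, n):
--             best = max(best - 1, prev[j])
--             left.append(best)
--         best = prev[n - 1]
--         right = [best]
--         for j in range(n - 2, -1, -1):
--             best = max(best - 1, prev[j])
--             right.append(best)
--         right.reverse()
--         prev = [row[j] + max(left[j], right[j]) for j in range(n)]
--     return max(prev)
-- ===== Notes on version B (the rewrite author's own statement) =====
-- stated objective: faster
-- what changed: Replaces the memoized top-down recursion with an O(n) inner scan per row: a bottom-up DP whose left-to-right and right-to-left running-max passes propagate dp(i-1,k)-|j-k| instead of scanning all k for each j.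
-- outside the precondition, e.g. on maxPoints_tle2([]): A raises IndexError, B raises IndexError; on maxPoints_tle2([[]]): A raises ValueError, B raises ValueError; on maxPoints_tle2([[1, 2], [3]]): A raises IndexError, B raises IndexError
import Mathlib
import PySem

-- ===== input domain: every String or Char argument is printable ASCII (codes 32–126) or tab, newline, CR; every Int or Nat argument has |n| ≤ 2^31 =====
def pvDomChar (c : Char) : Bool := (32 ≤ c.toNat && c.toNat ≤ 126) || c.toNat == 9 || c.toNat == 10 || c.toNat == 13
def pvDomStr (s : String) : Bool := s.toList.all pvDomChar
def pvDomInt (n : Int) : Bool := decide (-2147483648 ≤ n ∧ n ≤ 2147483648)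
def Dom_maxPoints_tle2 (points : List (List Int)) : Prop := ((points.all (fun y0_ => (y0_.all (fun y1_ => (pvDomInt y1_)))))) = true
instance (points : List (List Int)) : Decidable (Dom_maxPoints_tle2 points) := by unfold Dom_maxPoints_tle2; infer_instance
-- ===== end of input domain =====

-- B replaces A's memoized top-down recursion (which scans all n columns for every cell) by a
-- bottom-up row DP with left/right running-max passes; return values agree on Pre_.

-- ===== PORT A =====
-- dp(i, j) of A: `@cache` only memoizes — the computed values are exactly this recursion.
-- points[i][j] is in range on every input admitted by Pre_ (pyGetD's defaults are never hit there).
def dpA (points : List (List Int)) (n : Nat) : Nat → Int → Int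
  | 0, j => PySem.List.pyGetD (PySem.List.pyGetD points 0 []) j 0
  | i+1, j =>
      (PySem.List.max?
        ((PySem.List.pyRange 0 (n : Int) 1).map (fun k =>
          PySem.List.pyGetD (PySem.List.pyGetD points ((i : Int) + 1) []) j 0
            + dpA points n i k - |j - k|))
        (fun y => y)).getD 0

def maxPoints_tle2 (points : List (List Int)) : Int :=
  let m := points.length
  let n := (PySem.List.pyGetD points 0 []).length
  (PySem.List.max?
    ((PySem.List.pyRange 0 (n : Int) 1).map (fun k => dpA points n (m - 1) k))
    (fun y => y)).getD 0

-- ===== PORT B =====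
-- one iteration of Source B's `for row in points[1:]` loop body (left pass, right pass, combine)
def altRow (n : Nat) (prev row : List Int) : List Int :=
  let b0 := PySem.List.pyGetD prev 0 0
  let stL := (PySem.List.pyRange 1 (n : Int) 1).foldl
      (fun (st : List Int × Int) j =>
        let b := max (st.2 - 1) (PySem.List.pyGetD prev j 0)
        (st.1 ++ [b], b)) ([b0], b0)
  let left := stL.1
  let c0 := PySem.List.pyGetD prev ((n : Int) - 1) 0
  let stR := (PySem.List.pyRange ((n : Int) - 2) (-1) (-1)).foldl
      (fun (st : List Int × Int) j =>
        let b := max (st.2 - 1) (PySem.List.pyGetD prev j 0)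
        (st.1 ++ [b], b)) ([c0], c0)
  let right := stR.1.reverse
  (PySem.List.pyRange 0 (n : Int) 1).map (fun j =>
    PySem.List.pyGetD row j 0 + max (PySem.List.pyGetD left j 0) (PySem.List.pyGetD right j 0))

def maxPoints_tle2_alt (points : List (List Int)) : Int :=
  let n := (PySem.List.pyGetD points 0 []).length
  let prev0 := PySem.List.slice (PySem.List.pyGetD points 0 []) none (some (n : Int))
  let prev := (PySem.List.slice points (some 1) none).foldl (fun prev row => altRow n prev row) prev0
  (PySem.List.max? prev (fun y => y)).getD 0

-- ===== PRECONDITION & SPEC =====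
-- Pre_ excludes exactly the inputs where the Python A raises: points == [] (IndexError on points[0]),
-- points[0] == [] (ValueError: max() of an empty generator), and a row shorter than points[0] (IndexError).
def Pre_maxPoints_tle2 (points : List (List Int)) : Prop :=
  points ≠ [] ∧ 0 < (points.headD []).length ∧
    ∀ row ∈ points, (points.headD []).length ≤ row.length
instance (points : List (List Int)) : Decidable (Pre_maxPoints_tle2 points) := by
  unfold Pre_maxPoints_tle2; infer_instance

def pvWitness_maxPoints_tle2 : List (List Int) := [[1, 2, 3], [4, 5, 6]]

def Spec_maxPoints_tle2 (points : List (List Int)) (out : Int) : Prop := out = maxPoints_tle2_alt points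
instance (points : List (List Int)) (out : Int) : Decidable (Spec_maxPoints_tle2 points out) := by
  unfold Spec_maxPoints_tle2; infer_instance

-- ===== CLAIM (what is proved, stated in full; the proofs are below) =====
def Claim_equal_maxPoints_tle2 : Prop := ∀ (points : List (List Int)), Dom_maxPoints_tle2 points → Pre_maxPoints_tle2 points → Spec_maxPoints_tle2 points (maxPoints_tle2 points)

-- ===== LEMMAS AND PROOFS =====

theorem nonempty_range (n : Nat) (hn : 0 < n) : (Finset.range n).Nonempty :=
  ⟨0, Finset.mem_range.mpr hn⟩

theorem maxPy_append (l : List Int) (b : Int) (hl : l ≠ []) :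
    (PySem.List.max? (l ++ [b]) (fun y => y)).getD 0
      = max ((PySem.List.max? l (fun y => y)).getD 0) b := by
  cases l with
  | nil => exact absurd rfl hl
  | cons x t =>
      rw [List.cons_append, PySem.List.max?_id_cons, PySem.List.max?_id_cons]
      simp [List.foldl_append]

theorem maxPy_eq_sup' (G : Int → Int) (n : Nat) (hn : 0 < n) :
    (PySem.List.max? ((PySem.List.pyRange 0 (n : Int) 1).map G) (fun y => y)).getD 0
      = (Finset.range n).sup' (nonempty_range n hn) (fun k => G (k : Int)) := by
  induction n with
  | zero => omega
  | succ m ih =>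
      rcases Nat.eq_zero_or_pos m with hm | hm
      · subst hm
        have h1 : ((1:Nat) : Int) = 0 + 1 := by norm_num
        rw [h1, PySem.List.pyRange_one_singleton]
        simp [PySem.List.max?_id_cons]
      · have hsplit : PySem.List.pyRange 0 ((m+1 : Nat) : Int) 1
            = PySem.List.pyRange 0 (m : Int) 1 ++ [(m : Int)] := by
          have : ((m+1 : Nat) : Int) = (m : Int) + 1 := by push_cast; ring
          rw [this, PySem.List.pyRange_one_succ_right (by positivity)]
        rw [hsplit, List.map_append, List.map_singleton,
          maxPy_append _ _ (by apply List.ne_nil_of_length_pos; simp [PySem.List.length_pyRange_one]; omega), ih hm]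
        have hc : (Finset.range (m+1)).sup' (nonempty_range (m+1) hn) (fun k => G (k:Int))
            = (insert m (Finset.range m)).sup' (by simp) (fun k => G (k:Int)) :=
          Finset.sup'_congr _ Finset.range_add_one (fun x _ => rfl)
        rw [hc, Finset.sup'_insert (nonempty_range m hm) (fun x : Nat => G ↑x)]
        have : (G ↑m) ⊔ ((Finset.range m).sup' (nonempty_range m hm) fun x : Nat => G ↑x)
            = max (G ↑m) ((Finset.range m).sup' (nonempty_range m hm) fun x : Nat => G ↑x) := rfl
        rw [this]
        exact max_comm _ _

theorem maxPy_list (l : List Int) (hl : 0 < l.length) :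
    (PySem.List.max? l (fun y => y)).getD 0
      = (Finset.range l.length).sup' (nonempty_range _ hl) (fun k => l.getD k 0) := by
  conv_lhs => rw [← PySem.List.map_pyGetD_pyRange_zero' l 0]
  rw [maxPy_eq_sup' (fun j => PySem.List.pyGetD l j 0) l.length hl]
  exact Finset.sup'_congr _ rfl (fun x _ => PySem.List.pyGetD_natCast l x 0)

-- running-max scan: value after t steps, seeded with a, fed h 0, h 1, …
def scanF (a : Int) (h : Nat → Int) : Nat → Int
  | 0 => a
  | k+1 => max (scanF a h k - 1) (h k)

theorem scanF_congr (a : Int) (h h' : Nat → Int) (t : Nat) (hh : ∀ k < t, h k = h' k) :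
    scanF a h t = scanF a h' t := by
  induction t with
  | zero => rfl
  | succ u ih => simp [scanF, ih (fun k hk => hh k (by omega)), hh u (by omega)]

theorem scan_fold (g : Int → Int) (a : Int) (hι : Nat → Int) (t : Nat) :
    ((List.range t).map hι).foldl
        (fun (st : List Int × Int) j =>
          (st.1 ++ [max (st.2 - 1) (g j)], max (st.2 - 1) (g j))) ([a], a)
      = ((List.range (t + 1)).map (scanF a (fun k => g (hι k))),
          scanF a (fun k => g (hι k)) t) := by
  induction t with
  | zero => simp [scanF]
  | succ u ih =>
      rw [List.range_succ, List.map_append, List.foldl_append, ih]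
      simp [scanF, List.range_succ]

-- left pass value at column j:  max_{k ≤ j} (f k - (j - k))
def Lf (f : Nat → Int) : Nat → Int := scanF (f 0) (fun k => f (k + 1))
-- right pass value d steps from the right edge (column j = n-1-d):  max_{k ≥ j} (f k - (k - j))
def Rf (f : Nat → Int) (n : Nat) : Nat → Int := scanF (f (n - 1)) (fun k => f (n - 2 - k))

theorem sup'_sub_one (s : Finset Nat) (H : s.Nonempty) (f : Nat → Int) :
    s.sup' H f - 1 = s.sup' H (fun x => f x - 1) := by
  have := Finset.sup'_add s f (-1) H
  simpa [sub_eq_add_neg] using this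

theorem Lf_char (f : Nat → Int) (j : Nat) :
    Lf f j = (Finset.range (j + 1)).sup' (nonempty_range _ (Nat.succ_pos j))
      (fun k => f k - ((j : Int) - (k : Int))) := by
  induction j with
  | zero => simp [Lf, scanF]
  | succ u ih =>
      have hstep : Lf f (u + 1) = max (Lf f u - 1) (f (u + 1)) := rfl
      rw [hstep, ih, sup'_sub_one]
      have hc : (Finset.range (u + 1 + 1)).sup' (nonempty_range _ (Nat.succ_pos _))
            (fun k => f k - (((u:Int) + 1) - (k : Int)))
          = (insert (u+1) (Finset.range (u+1))).sup' (by simp)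
            (fun k => f k - (((u:Int) + 1) - (k : Int))) :=
        Finset.sup'_congr _ Finset.range_add_one (fun x _ => rfl)
      have hfun : (Finset.range (u+1)).sup' (nonempty_range _ (Nat.succ_pos u))
            (fun x => f x - ((u:Int) - (x:Int)) - 1)
          = (Finset.range (u+1)).sup' (nonempty_range _ (Nat.succ_pos u))
            (fun x => f x - (((u:Int) + 1) - (x:Int))) :=
        Finset.sup'_congr _ rfl (fun x _ => by ring)
      rw [hfun]
      push_cast
      rw [hc, Finset.sup'_insert (nonempty_range _ (Nat.succ_pos u))]
      have hmax : ∀ a b : Int, a ⊔ b = max a b := fun _ _ => rfl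
      rw [hmax, max_comm]
      congr 1
      push_cast
      ring

theorem Rf_char (f : Nat → Int) (n : Nat) : ∀ d, d < n →
    Rf f n d = (Finset.Icc (n - 1 - d) (n - 1)).sup' ⟨n - 1, by simp only [Finset.mem_Icc]; omega⟩
      (fun k => f k - ((k : Int) - ((n - 1 - d : Nat) : Int))) := by
  intro d
  induction d with
  | zero =>
      intro _
      simp [Rf, scanF, Finset.Icc_self]
  | succ u ih =>
      intro hd
      have hu : u < n := by omega
      have hstep : Rf f n (u + 1) = max (Rf f n u - 1) (f (n - 2 - u)) := rfl
      rw [hstep, ih hu, sup'_sub_one]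
      set a := n - 1 - (u + 1) with ha
      have h2 : n - 1 - u = a + 1 := by omega
      have hne : (Finset.Icc (a+1) (n-1)).Nonempty := ⟨n-1, by simp only [Finset.mem_Icc]; omega⟩
      have hins : (Finset.Icc a (n-1)).sup' ⟨n-1, by simp only [Finset.mem_Icc]; omega⟩
            (fun k => f k - ((k : Int) - ((a : Nat) : Int)))
          = (insert a (Finset.Icc (a+1) (n-1))).sup'
              ⟨n-1, Finset.mem_insert.mpr (Or.inr (Finset.mem_Icc.mpr (by omega)))⟩
            (fun k => f k - ((k : Int) - ((a : Nat) : Int))) := by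
        refine Finset.sup'_congr _ ?_ (fun x _ => rfl)
        ext x
        simp only [Finset.mem_Icc, Finset.mem_insert]
        omega
      have hfun : (Finset.Icc (n-1-u) (n-1)).sup' ⟨n-1, by simp only [Finset.mem_Icc]; omega⟩
            (fun x => f x - ((x : Int) - ((n - 1 - u : Nat) : Int)) - 1)
          = (Finset.Icc (a+1) (n-1)).sup' hne
            (fun x => f x - ((x : Int) - ((a : Nat) : Int))) := by
        refine Finset.sup'_congr _ (by rw [h2]) (fun x _ => ?_)
        have : ((n - 1 - u : Nat) : Int) = ((a : Nat) : Int) + 1 := by omega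
        rw [this]; ring
      rw [hfun, hins, Finset.sup'_insert hne]
      have hmax : ∀ p q : Int, p ⊔ q = max p q := fun _ _ => rfl
      rw [hmax, max_comm]
      have h4 : n - 2 - u = a := by omega
      rw [h4]
      congr 1
      ring

theorem colmax (f : Nat → Int) (n j : Nat) (hn : 0 < n) (hj : j < n) :
    (Finset.range n).sup' (nonempty_range n hn) (fun k => f k - |(j : Int) - (k : Int)|)
      = max (Lf f j) (Rf f n (n - 1 - j)) := by
  have hd : n - 1 - j < n := by omega
  have hneI : (Finset.Icc j (n-1)).Nonempty := ⟨j, by simp only [Finset.mem_Icc]; omega⟩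
  have hsplit : (Finset.range n).sup' (nonempty_range n hn) (fun k => f k - |(j : Int) - (k : Int)|)
      = (Finset.range (j+1) ∪ Finset.Icc j (n-1)).sup'
          ((nonempty_range _ (Nat.succ_pos j)).mono Finset.subset_union_left)
        (fun k => f k - |(j : Int) - (k : Int)|) := by
    refine Finset.sup'_congr _ ?_ (fun x _ => rfl)
    ext x
    simp only [Finset.mem_union, Finset.mem_Icc, Finset.mem_range]
    omega
  rw [hsplit, Finset.sup'_union (nonempty_range _ (Nat.succ_pos j)) hneI]
  have hL : (Finset.range (j+1)).sup' (nonempty_range _ (Nat.succ_pos j))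
        (fun k => f k - |(j : Int) - (k : Int)|) = Lf f j := by
    rw [Lf_char]
    refine Finset.sup'_congr _ rfl (fun x hx => ?_)
    have hx' : x ≤ j := by simpa [Nat.lt_succ_iff] using Finset.mem_range.mp hx
    have : |(j : Int) - (x : Int)| = (j : Int) - (x : Int) := abs_of_nonneg (by omega)
    rw [this]
  have hR : (Finset.Icc j (n-1)).sup' hneI
        (fun k => f k - |(j : Int) - (k : Int)|) = Rf f n (n - 1 - j) := by
    rw [Rf_char f n (n - 1 - j) hd]
    have hj' : n - 1 - (n - 1 - j) = j := by omega
    refine Finset.sup'_congr _ (by rw [hj']) (fun x hx => ?_)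
    have hx' : j ≤ x := (Finset.mem_Icc.mp hx).1
    have h1 : |(j : Int) - (x : Int)| = (x : Int) - (j : Int) := by
      rw [abs_sub_comm]; exact abs_of_nonneg (by omega)
    rw [h1, hj']
  rw [hL, hR]

theorem rev_map_range_getD (f : Nat → Int) (n j : Nat) (hj : j < n) :
    (((List.range n).map f).reverse).getD j 0 = f (n - 1 - j) := by
  rw [List.getD_eq_getElem _ _ (by simpa using hj), List.getElem_reverse, List.getElem_map,
    List.getElem_range]
  congr 1
  simp

theorem altRow_length (n : Nat) (prev row : List Int) : (altRow n prev row).length = n := by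
  simp [altRow, PySem.List.length_pyRange_one]

theorem altRow_getD (n : Nat) (prev row : List Int) (hn : 0 < n) (hp : prev.length = n)
    (j : Nat) (hj : j < n) :
    (altRow n prev row).getD j 0
      = row.getD j 0 + (Finset.range n).sup' (nonempty_range n hn)
          (fun k => prev.getD k 0 - |(j : Int) - (k : Int)|) := by
  have h1 : ((n : Int) - 1).toNat = n - 1 := by omega
  have h2 : ((n : Int) - 2 - (-1)).toNat = n - 1 := by omega
  have hL : PySem.List.pyRange 1 (n : Int) 1
      = (List.range (n-1)).map (fun k : Nat => (1 : Int) + (k : Int)) := by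
    rw [PySem.List.pyRange_one, show ((n:Int) - 1).toNat = n - 1 from h1]
  have hRr : PySem.List.pyRange ((n : Int) - 2) (-1) (-1)
      = (List.range (n-1)).map (fun k : Nat => (n : Int) - 2 - (k : Int)) := by
    rw [PySem.List.pyRange_neg_one, show ((n:Int) - 2 - (-1)).toNat = n - 1 from h2]
  have hb0 : PySem.List.pyGetD prev 0 0 = prev.getD 0 0 := by
    simpa using PySem.List.pyGetD_natCast prev 0 0
  have hc0 : PySem.List.pyGetD prev ((n : Int) - 1) 0 = prev.getD (n-1) 0 := by
    have : ((n : Int) - 1) = ((n - 1 : Nat) : Int) := by omega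
    rw [this, PySem.List.pyGetD_natCast]
  have hnn : n - 1 + 1 = n := by omega
  simp only [altRow, hL, hRr, hb0, hc0]
  rw [scan_fold (fun j => PySem.List.pyGetD prev j 0) (prev.getD 0 0) (fun k => (1:Int)+k) (n-1)]
  rw [scan_fold (fun j => PySem.List.pyGetD prev j 0) (prev.getD (n-1) 0) (fun k => (n:Int)-2-k) (n-1)]
  rw [hnn]
  have hP0 : PySem.List.pyRange 0 (n : Int) 1
      = (List.range n).map (fun k : Nat => (0 : Int) + (k : Int)) := by
    rw [PySem.List.pyRange_one, show ((n:Int) - 0).toNat = n by omega]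
  rw [hP0, List.map_map, List.getD_eq_getElem _ _ (by simp; omega), List.getElem_map,
    List.getElem_range]
  simp only [Function.comp]
  have hcast : ((0:Int) + (j:Int)) = ((j:Nat):Int) := by omega
  have hrow : PySem.List.pyGetD row ((0:Int) + j) 0 = row.getD j 0 := by
    rw [hcast, PySem.List.pyGetD_natCast]
  rw [hrow]
  congr 1
  have hleft : PySem.List.pyGetD ((List.range n).map
        (scanF (prev.getD 0 0) (fun k => PySem.List.pyGetD prev ((1:Int)+k) 0))) ((0:Int)+j) 0
      = Lf (fun k => prev.getD k 0) j := by
    rw [hcast, PySem.List.pyGetD_natCast, PySem.List.getD_map_range _ _ _ _ hj]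
    unfold Lf
    apply scanF_congr
    intro k _
    have : ((1:Int) + k) = ((k+1 : Nat) : Int) := by omega
    rw [this, PySem.List.pyGetD_natCast]
  have hright : PySem.List.pyGetD (((List.range n).map
        (scanF (prev.getD (n-1) 0) (fun k => PySem.List.pyGetD prev ((n:Int)-2-k) 0))).reverse) ((0:Int)+j) 0
      = Rf (fun k => prev.getD k 0) n (n - 1 - j) := by
    rw [hcast, PySem.List.pyGetD_natCast, rev_map_range_getD _ _ _ hj]
    unfold Rf
    apply scanF_congr
    intro k hk
    have : ((n:Int) - 2 - k) = ((n - 2 - k : Nat) : Int) := by omega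
    rw [this, PySem.List.pyGetD_natCast]
  rw [hleft, hright, colmax _ _ _ hn hj]

theorem foldl_inv (p0 : List Int) (rest : List (List Int)) (hn : 0 < p0.length) :
    ∀ i, i ≤ rest.length →
      (((rest.take i).foldl (fun prev row => altRow p0.length prev row) p0).length = p0.length ∧
       ∀ j < p0.length,
         ((rest.take i).foldl (fun prev row => altRow p0.length prev row) p0).getD j 0
           = dpA (p0 :: rest) p0.length i (j : Int)) := by
  intro i
  induction i with
  | zero =>
      intro _
      refine ⟨by simp, fun j hj => ?_⟩
      simp only [List.take_zero, List.foldl_nil, dpA]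
      rw [show ((0:Int)) = ((0:Nat):Int) from rfl, PySem.List.pyGetD_natCast,
        PySem.List.pyGetD_natCast]
      simp
  | succ i ih =>
      intro hi
      have hi' : i < rest.length := by omega
      obtain ⟨ihlen, ihval⟩ := ih (by omega)
      have htake : rest.take (i+1) = rest.take i ++ [rest[i]] := by
        rw [List.take_add_one]
        simp [List.getElem?_eq_getElem hi']
      rw [htake, List.foldl_append]
      set prevI := (rest.take i).foldl (fun prev row => altRow p0.length prev row) p0 with hprevI
      refine ⟨altRow_length _ _ _, fun j hj => ?_⟩
      simp only [List.foldl_cons, List.foldl_nil]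
      rw [altRow_getD p0.length prevI (rest[i]) hn ihlen j hj]
      have hsup : (Finset.range p0.length).sup' (nonempty_range _ hn)
            (fun k => prevI.getD k 0 - |(j : Int) - (k : Int)|)
          = (Finset.range p0.length).sup' (nonempty_range _ hn)
            (fun k => dpA (p0 :: rest) p0.length i (k : Int) - |(j : Int) - (k : Int)|) :=
        Finset.sup'_congr _ rfl (fun x hx => by
          rw [ihval x (Finset.mem_range.mp hx)])
      rw [hsup]
      show _ = dpA (p0 :: rest) p0.length (i+1) (j : Int)
      rw [show dpA (p0 :: rest) p0.length (i+1) (j : Int)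
          = (PySem.List.max?
              ((PySem.List.pyRange 0 (p0.length : Int) 1).map (fun k =>
                PySem.List.pyGetD (PySem.List.pyGetD (p0 :: rest) ((i : Int) + 1) []) (j:Int) 0
                  + dpA (p0 :: rest) p0.length i k - |(j:Int) - k|))
              (fun y => y)).getD 0 from rfl]
      rw [maxPy_eq_sup' _ _ hn]
      have hrow : PySem.List.pyGetD (p0 :: rest) ((i : Int) + 1) [] = rest.getD i [] := by
        rw [show ((i:Int) + 1) = ((i+1 : Nat) : Int) by omega, PySem.List.pyGetD_natCast]
        simp
      have hrowj : PySem.List.pyGetD (rest.getD i []) (j:Int) 0 = (rest.getD i []).getD j 0 :=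
        PySem.List.pyGetD_natCast _ _ _
      have hgd : rest.getD i [] = rest[i] := by
        simp [List.getD_eq_getElem?_getD, List.getElem?_eq_getElem hi']
      have hpull : (Finset.range p0.length).sup' (nonempty_range _ hn)
            (fun x => PySem.List.pyGetD (PySem.List.pyGetD (p0 :: rest) ((i : Int) + 1) []) (j:Int) 0
              + dpA (p0 :: rest) p0.length i (x:Int) - |(j:Int) - (x:Int)|)
          = (Finset.range p0.length).sup' (nonempty_range _ hn)
            (fun x => dpA (p0 :: rest) p0.length i (x:Int) - |(j:Int) - (x:Int)|)
            + (rest.getD i []).getD j 0 := by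
        rw [Finset.sup'_add]
        refine Finset.sup'_congr _ rfl (fun x _ => ?_)
        rw [hrow, hrowj]
        ring
      rw [hpull, hgd]
      ring

theorem main_eq (points : List (List Int)) (hne : points ≠ [])
    (hlen : 0 < (points.headD []).length) : maxPoints_tle2 points = maxPoints_tle2_alt points := by
  cases points with
  | nil => exact absurd rfl hne
  | cons p0 rest =>
      have hn : 0 < p0.length := by simp only [List.headD_cons] at hlen; exact hlen
      have hp0 : PySem.List.pyGetD (p0 :: rest) 0 [] = p0 := by
        simpa using PySem.List.pyGetD_natCast (p0 :: rest) 0 []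
      simp only [maxPoints_tle2, maxPoints_tle2_alt, hp0]
      have hm : (p0 :: rest).length - 1 = rest.length := by simp
      rw [hm]
      rw [maxPy_eq_sup' (fun k => dpA (p0 :: rest) p0.length rest.length k) _ hn]
      have hslice1 : PySem.List.slice (p0 :: rest) (some 1) none = rest := by
        rw [PySem.List.slice_from_one]
        rfl
      have hprev0 : PySem.List.slice p0 none (some (p0.length : Int)) = p0 := by
        rw [PySem.List.slice_to_natCast]
        exact List.take_length ..
      rw [hslice1, hprev0]
      have hfold : rest.foldl (fun prev row => altRow p0.length prev row) p0
          = (rest.take rest.length).foldl (fun prev row => altRow p0.length prev row) p0 := by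
        rw [List.take_length]
      obtain ⟨hflen, hfval⟩ := foldl_inv p0 rest hn rest.length (le_refl _)
      rw [hfold]
      set prevF := (rest.take rest.length).foldl (fun prev row => altRow p0.length prev row) p0
        with hprevF
      rw [maxPy_list prevF (by omega)]
      refine Eq.symm (Finset.sup'_congr _ (by rw [hflen]) (fun x hx => ?_))
      exact hfval x (by rw [← hflen]; exact Finset.mem_range.mp hx)

-- ===== VERDICT (by name: the statement is the Claim_ definition above) =====
theorem maxPoints_tle2_spec : Claim_equal_maxPoints_tle2 := by
  intro points _ hpre
  obtain ⟨hne, hlen, _⟩ := hpre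
  unfold Spec_maxPoints_tle2
  exact main_eq points hne hlen
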